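-- pv_equiv track=rewrite | github.com/DragonSun329/briefAI | pipeline/modules/report_formatter.py | _get_article_date_range
-- ===== SOURCE A (Python) =====
-- from typing import List, Dict, Any
--
-- def _get_article_date_range(articles: List[Dict[str, Any]]) -> str:
--     """Get date range of articles"""
--     if not articles:
--         return "Unknown"
--
--     dates = []
--     for article in articles:
--         pub_date = article.get('published_date', '')
--         if pub_date:
--             dates.append(pub_date)
--
--     if not dates:
--         return "Unknown"
--
--     dates.sort()
--     return f"{dates[0]} 至 {dates[-1]}"
-- ===== SOURCE B (Python) =====
-- def _get_article_date_range(articles):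
--     """Get date range of articles (single pass, no sort)."""
--     lo = hi = None
--     for article in articles:
--         d = article.get('published_date', '')
--         if d:
--             if lo is None:
--                 lo = hi = d
--             else:
--                 if d < lo:
--                     lo = d
--                 if d > hi:
--                     hi = d
--     if lo is None:
--         return "Unknown"
--     return f"{lo} 至 {hi}"
-- ===== Notes on version B (the rewrite author's own statement) =====
-- stated objective: simpler
-- what changed: Replaces collect-then-sort with a single pass keeping running min/max of the non-empty published dates (same lexicographic string comparison); the empty-articles guard becomes the lo-is-None check.
import Mathlib
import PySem

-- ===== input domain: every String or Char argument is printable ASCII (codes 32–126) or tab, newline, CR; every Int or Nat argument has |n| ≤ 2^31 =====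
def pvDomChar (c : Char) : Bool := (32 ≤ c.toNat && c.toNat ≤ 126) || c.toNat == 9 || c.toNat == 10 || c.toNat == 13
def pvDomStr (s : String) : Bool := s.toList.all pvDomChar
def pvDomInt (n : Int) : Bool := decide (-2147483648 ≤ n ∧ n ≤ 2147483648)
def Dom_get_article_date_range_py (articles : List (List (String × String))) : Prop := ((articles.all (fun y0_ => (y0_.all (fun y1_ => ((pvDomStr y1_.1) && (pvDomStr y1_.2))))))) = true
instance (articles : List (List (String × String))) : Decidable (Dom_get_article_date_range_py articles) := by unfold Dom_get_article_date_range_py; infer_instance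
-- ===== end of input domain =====

-- B replaces A's collect-then-sort with one running-min/max pass; same return value, no side effects.
-- ===== PORT A =====
-- article.get('published_date', ''): first-match lookup in the association list, '' when absent (exact for dict get)
def pvPubDate (article : List (String × String)) : String := (article.lookup "published_date").getD ""

-- dates[0] / dates[-1] are taken on the sorted list only in the nonempty branch: headD/getLastD are exact there.
def get_article_date_range_py (articles : List (List (String × String))) : String :=
  if articles = [] then "Unknown"
  else
    let dates := articles.foldl (fun ds article =>
      if pvPubDate article ≠ "" then ds ++ [pvPubDate article] else ds) []
    if dates = [] then "Unknown"
    else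
      let s := PySem.List.sorted dates (fun x => x) false
      (s.headD "") ++ " 至 " ++ (s.getLastD "")

-- ===== PORT B =====
-- B's loop body: fold the next non-empty date into the running (lo, hi)
def pvUpdate (acc : Option (String × String)) (d : String) : Option (String × String) :=
  match acc with
  | none => some (d, d)
  | some (lo, hi) => some (min lo d, max hi d)

def get_article_date_range_py_alt (articles : List (List (String × String))) : String :=
  match articles.foldl (fun acc article =>
      if pvPubDate article ≠ "" then pvUpdate acc (pvPubDate article) else acc) none with
  | none => "Unknown"
  | some (lo, hi) => lo ++ " 至 " ++ hi

-- ===== PRECONDITION & SPEC =====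
def Spec_get_article_date_range_py (articles : List (List (String × String))) (out : String) : Prop := out = get_article_date_range_py_alt articles
instance (articles : List (List (String × String))) (out : String) : Decidable (Spec_get_article_date_range_py articles out) := by unfold Spec_get_article_date_range_py; infer_instance

-- ===== CLAIM (what is proved, stated in full; the proofs are below) =====
def Claim_equal_get_article_date_range_py : Prop := ∀ (articles : List (List (String × String))), Dom_get_article_date_range_py articles → Spec_get_article_date_range_py articles (get_article_date_range_py articles)

-- ===== LEMMAS AND PROOFS =====

-- the list of kept (truthy) dates
def pvDates (articles : List (List (String × String))) : List String :=
  articles.filterMap (fun a => if pvPubDate a ≠ "" then some (pvPubDate a) else none)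

-- A's collecting loop builds pvDates
theorem pvA_dates (articles : List (List (String × String))) (init : List String) :
    articles.foldl (fun ds article =>
      if pvPubDate article ≠ "" then ds ++ [pvPubDate article] else ds) init
    = init ++ pvDates articles := by
  induction articles generalizing init with
  | nil => simp [pvDates]
  | cons a t ih =>
    rw [List.foldl_cons, ih]
    by_cases h : pvPubDate a = "" <;> simp [pvDates, h]

-- B's loop over articles is the min/max loop over pvDates
theorem pvB_fold (articles : List (List (String × String))) (acc : Option (String × String)) :
    articles.foldl (fun acc article =>
      if pvPubDate article ≠ "" then pvUpdate acc (pvPubDate article) else acc) acc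
    = (pvDates articles).foldl pvUpdate acc := by
  induction articles generalizing acc with
  | nil => simp [pvDates]
  | cons a t ih =>
    rw [List.foldl_cons, ih]
    by_cases h : pvPubDate a = "" <;> simp [pvDates, h]

-- the min/max loop started on some (lo, hi)
theorem pvStep_some (ds : List String) (lo hi : String) :
    ds.foldl pvUpdate (some (lo, hi))
    = some (ds.foldl min lo, ds.foldl max hi) := by
  induction ds generalizing lo hi with
  | nil => rfl
  | cons d t ih => simp [pvUpdate, ih]

-- in a ≤-sorted nonempty list every element is ≤ the last one
theorem pv_le_getLastD (d : String) :
    ∀ (l : List String), l.Pairwise (· ≤ ·) → ∀ x ∈ l, x ≤ l.getLastD d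
  | [] => by simp
  | [y] => by simp
  | y :: z :: r => fun hp x hx => by
      rcases List.mem_cons.mp hx with rfl | hxt
      · have hmem : (z :: r).getLastD d ∈ z :: r := by
          rw [List.getLastD_cons]; exact List.getLastD_mem_cons
        have := (List.pairwise_cons.mp hp).1 _ hmem
        simpa using this
      · have := pv_le_getLastD d (z :: r) (List.pairwise_cons.mp hp).2 x hxt
        simpa using this

-- head and last of the sorted nonempty list are the running min and max
theorem pv_sorted_ends (d : String) (ds : List String) :
    (PySem.List.sorted (d :: ds) (fun x => x) false).headD "" = ds.foldl min d ∧
    (PySem.List.sorted (d :: ds) (fun x => x) false).getLastD "" = ds.foldl max d := by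
  have hne : PySem.List.sorted (d :: ds) (fun x => x) false ≠ [] := by
    simp [PySem.List.sorted_eq_nil_iff]
  obtain ⟨h, t, hs⟩ := List.exists_cons_of_ne_nil hne
  have hmem : ∀ x, (x ∈ PySem.List.sorted (d :: ds) fun x => x) ↔ x ∈ d :: ds := fun x =>
    PySem.List.mem_sorted _ _ _ _
  have hmin := List.min?_eq_some_iff_subtype.mp (List.min?_cons' (x := d) (xs := ds))
  have hmax := List.max?_eq_some_iff_subtype.mp (List.max?_cons' (x := d) (xs := ds))
  constructor
  · have hhead_le : ∀ y ∈ d :: ds, h ≤ y := by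
      intro y hy
      simpa using PySem.List.key_head_sorted_le _ (fun x => x) hs y hy
    have hh_mem : h ∈ d :: ds := (hmem h).mp (hs ▸ List.mem_cons_self)
    rw [hs]
    exact le_antisymm (hhead_le _ hmin.1) (hmin.2 h hh_mem)
  · have hp : (PySem.List.sorted (d :: ds) fun x => x).Pairwise (· ≤ ·) := by
      simpa using PySem.List.sorted_pairwise (xs := d :: ds) (key := fun x => x)
    have hlast_mem : (PySem.List.sorted (d :: ds) (fun x => x) false).getLastD "" ∈ d :: ds := by
      refine (hmem _).mp ?_
      rw [hs, List.getLastD_cons]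
      exact List.getLastD_mem_cons
    have hle : ∀ x ∈ d :: ds, x ≤ (PySem.List.sorted (d :: ds) (fun x => x) false).getLastD "" :=
      fun x hx => pv_le_getLastD "" _ hp x ((hmem x).mpr hx)
    exact le_antisymm (hmax.2 _ hlast_mem) (hle _ hmax.1)

-- ===== VERDICT (by name: the statement is the Claim_ definition above) =====
theorem get_article_date_range_py_spec : Claim_equal_get_article_date_range_py := by
  intro articles _
  show get_article_date_range_py articles = get_article_date_range_py_alt articles
  unfold get_article_date_range_py get_article_date_range_py_alt
  rw [pvA_dates, pvB_fold]
  by_cases hA : articles = []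
  · subst hA; rfl
  · rw [if_neg hA]
    cases pvDates articles with
    | nil => rfl
    | cons d ds =>
      simp only [List.foldl_cons, pvUpdate]
      rw [pvStep_some]
      obtain ⟨h1, h2⟩ := pv_sorted_ends d ds
      simp only [List.headD_eq_head?_getD, List.getLastD_eq_getLast?] at h1 h2
      simp [h1, h2]
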